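-- pv_equiv track=rewrite | github.com/w5802021/leet_niuke | 笔试题目/Tencent/腾讯2018笔试试题/贪吃的小Q.py | bin_seach
-- ===== SOURCE A (Python) =====
-- import math
--
-- def summ(s, n, m):
--     # 计算以s为第一天的量，吃n天最少需要多少巧克力
--     summ = 0
--     for i in range(n):
--         summ += s
--         # s为下一天需要吃的数量
--         s = math.ceil(s / 2)
--     return summ
--
-- def bin_seach(n, m):
--     '''
--     题目要求第一天多吃多少巧克力？
--     思路：第一天可以吃的巧克力数量为1---m块，因此可以尝试第一天取1到m中的数，并判断是否满足父母回来前还有巧克力即可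
--     贪心+二分搜索
--     :param n: 父母出差n天
--     :param m: 总的巧克力数量
--     :return: 第一天最大的可吃的巧克力数量
--     '''
--     if n == 1:
--         return m
--     # 1--m中二分搜索
--     low = 1
--     high = m
--     while low < high:
--         # 偶数的话中位数往上取
--         mid = math.ceil((low + high) / 2)
--         if summ(mid, n, m) == m:
--             return mid
--         elif summ(mid, n, m) < m:
--             low = mid
--         else:
--             high = mid - 1
--     return high
-- ===== SOURCE B (Python) =====
-- def bin_seach(n, m):
--     # B: no day-by-day summing and no interval binary search.  The chain
--     # s, ceil(s/2), ceil(s/4), ... gives, with t = s-1, the closed form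
--     #   need(s) = n + (2t - popcount(t)) - (2u - popcount(u)),  u = t >> n,
--     # and the answer is built bit by bit from the most significant bit.
--     if n == 1 or m <= 1:
--         return m
--
--     def need(s):
--         if n <= 0:
--             return 0
--         t = s - 1
--         u = t >> n if n < t.bit_length() else 0
--         return n + (2 * t - bin(t).count("1")) - (2 * u - bin(u).count("1"))
--
--     ans = 0
--     bit = 1 << (m.bit_length() - 1)
--     while bit:
--         c = ans + bit
--         if c <= m and need(c) <= m:
--             ans = c
--         bit >>= 1
--     return ans if ans else 1
-- ===== Notes on version B (the rewrite author's own statement) =====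
-- stated objective: faster
-- what changed: B replaces A's day-by-day summ loop by the closed form n + (2t - popcount t) - (2u - popcount u) with t = s-1, u = t >> n (since the chain halves t exactly), and replaces the low/high binary search by an MSB-first bitwise construction of the maximal feasible first-day amount.
import Mathlib
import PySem

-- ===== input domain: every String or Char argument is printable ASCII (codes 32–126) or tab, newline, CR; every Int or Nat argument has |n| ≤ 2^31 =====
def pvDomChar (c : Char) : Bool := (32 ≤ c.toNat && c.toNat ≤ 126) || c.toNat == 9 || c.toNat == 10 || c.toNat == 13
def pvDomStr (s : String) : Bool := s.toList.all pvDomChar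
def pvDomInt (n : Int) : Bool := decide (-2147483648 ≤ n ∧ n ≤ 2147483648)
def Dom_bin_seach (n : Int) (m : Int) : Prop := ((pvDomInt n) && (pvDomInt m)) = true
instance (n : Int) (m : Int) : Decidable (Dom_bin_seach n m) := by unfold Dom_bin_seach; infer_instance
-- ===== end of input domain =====

-- B replaces A's O(n) per-day summ loop by a closed popcount formula and A's
-- low/high binary search by an MSB-first bitwise construction; objective: faster.

-- ===== PORT A =====
-- summ(s, n, m): for i in range(n): summ += s; s = math.ceil(s / 2)
-- math.ceil(s / 2) is exact here (|s| ≤ 2^31 < 2^53) and equals (s+1) // 2 for every int s.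
def summA (s : Int) (n : Int) (m : Int) : Int :=
  ((PySem.List.pyRange 0 n 1).foldl
    (fun (st : Int × Int) _ => (st.1 + st.2, PySem.Int.floordiv (st.2 + 1) 2)) (0, s)).1

-- while low < high: mid = math.ceil((low+high)/2); …  (exact: = (low+high+1) // 2)
-- fuel makes the loop structurally total; high - low shrinks every iteration, so
-- (m-1).toNat + 1 steps always reach low = high (proved in loopA_res below)
def loopA (m : Int) (n : Int) : Nat → Int → Int → Int
  | 0, _, high => high
  | fuel + 1, low, high =>
    if low < high then
      let mid : Int := PySem.Int.floordiv (low + high + 1) 2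
      if summA mid n m = m then mid
      else if summA mid n m < m then loopA m n fuel mid high
      else loopA m n fuel low (mid - 1)
    else high

def bin_seach (n : Int) (m : Int) : Int :=
  if n = 1 then m else loopA m n ((m - 1).toNat + 1) 1 m

-- ===== PORT B =====
-- bin(t).count("1"): popcount of a nonnegative int (fuel t suffices: t/2 < t)
def pvPopF : Nat → Nat → Nat
  | 0, _ => 0
  | fuel + 1, t => if t = 0 then 0 else t % 2 + pvPopF fuel (t / 2)

def pvPop (t : Nat) : Nat := pvPopF t t

-- need(s) of Source B; every call site has s ≥ 1, so t = s-1 is taken as a Nat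
-- (Python t.bit_length() = Nat.size, t >> n = t >>> n.toNat; exact for t ≥ 0, n ≥ 1)
def needB (n : Int) (s : Int) : Int :=
  if n ≤ 0 then 0
  else
    let t : Nat := (s - 1).toNat
    let u : Nat := if n < (Nat.size t : Int) then t >>> n.toNat else 0
    n + (2 * (t : Int) - (pvPop t : Int)) - (2 * (u : Int) - (pvPop u : Int))

-- the while-bit loop of Source B: c = ans + bit; keep c if it fits; bit >>= 1
-- (fuel = the bit count of m makes it structural; the loop runs exactly that often)
def bitloopB (n : Int) (m : Int) : Nat → Int → Nat → Int
  | 0, ans, _ => ans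
  | fuel + 1, ans, bit =>
    if bit = 0 then ans
    else
      let c : Int := ans + (bit : Int)
      bitloopB n m fuel (if c ≤ m ∧ needB n c ≤ m then c else ans) (bit / 2)

def bin_seach_alt (n : Int) (m : Int) : Int :=
  if n = 1 ∨ m ≤ 1 then m
  else
    let r := bitloopB n m (Nat.size m.toNat) 0 (2 ^ (Nat.size m.toNat - 1))
    if r = 0 then 1 else r

-- ===== PRECONDITION & SPEC =====
def Spec_bin_seach (n : Int) (m : Int) (out : Int) : Prop := out = bin_seach_alt n m
instance (n : Int) (m : Int) (out : Int) : Decidable (Spec_bin_seach n m out) := by unfold Spec_bin_seach; infer_instance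

-- ===== CLAIM (what is proved, stated in full; the proofs are below) =====
def Claim_equal_bin_seach : Prop := ∀ (n : Int) (m : Int), Dom_bin_seach n m → Spec_bin_seach n m (bin_seach n m)

-- ===== LEMMAS AND PROOFS =====

-- ceil-half step shared by the mathematical model
def pvHalf (s : Int) : Int := PySem.Int.floordiv (s + 1) 2

-- mathematical model of A's summ: sum of the first k halving terms
def pvSumN : Int → Nat → Int
  | _, 0 => 0
  | s, k + 1 => s + pvSumN (pvHalf s) k

-- sum of the first k floor-halvings of t
def pvS : Nat → Nat → Int
  | _, 0 => 0
  | t, k + 1 => (t : Int) + pvS (t / 2) k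

def pvG (t : Nat) : Int := 2 * (t : Int) - (pvPop t : Int)

theorem pvHalf_ediv (s : Int) : pvHalf s = (s + 1) / 2 :=
  PySem.Int.floordiv_eq_ediv_of_pos (by omega)

theorem pvHalf_mono {s t : Int} (h : s ≤ t) : pvHalf s ≤ pvHalf t := by
  rw [pvHalf_ediv, pvHalf_ediv]; omega

theorem summA_fold (l : List Int) : ∀ (acc s : Int),
    (l.foldl (fun (st : Int × Int) _ => (st.1 + st.2, PySem.Int.floordiv (st.2 + 1) 2)) (acc, s)).1
      = acc + pvSumN s l.length := by
  induction l with
  | nil => intro acc s; simp [pvSumN]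
  | cons x xs ih =>
    intro acc s
    simp only [List.foldl, List.length_cons, pvSumN]
    rw [ih]
    simp only [pvHalf]
    ring

theorem summA_eq (s n m : Int) : summA s n m = pvSumN s n.toNat := by
  unfold summA
  rw [summA_fold]
  simp [PySem.List.length_pyRange_one]

theorem pvSumN_mono_le : ∀ (k : Nat) {s t : Int}, s ≤ t → pvSumN s k ≤ pvSumN t k := by
  intro k
  induction k with
  | zero => intro s t _; simp [pvSumN]
  | succ j ih =>
    intro s t h
    simp only [pvSumN]
    exact add_le_add h (ih (pvHalf_mono h))

theorem pvSumN_mono_lt {k : Nat} (hk : 1 ≤ k) {s t : Int} (h : s < t) :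
    pvSumN s k < pvSumN t k := by
  obtain ⟨j, rfl⟩ : ∃ j, k = j + 1 := ⟨k - 1, by omega⟩
  simp only [pvSumN]
  have := pvSumN_mono_le j (pvHalf_mono (le_of_lt h))
  omega

-- the halving chain on s is the floor-halving chain on t = s - 1
theorem pvSumN_shift : ∀ (k : Nat) (s : Int), 1 ≤ s →
    pvSumN s k = k + pvS (s - 1).toNat k := by
  intro k
  induction k with
  | zero => intro s _; simp [pvSumN, pvS]
  | succ j ih =>
    intro s hs
    have h1 : 1 ≤ pvHalf s := by rw [pvHalf_ediv]; omega
    have h2 : (pvHalf s - 1).toNat = (s - 1).toNat / 2 := by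
      rw [pvHalf_ediv]; omega
    simp only [pvSumN, pvS, ih (pvHalf s) h1, h2]
    have h3 : ((s - 1).toNat : Int) = s - 1 := by omega
    push_cast
    omega

-- one-step unfolding lemmas for the fuelled ports (all definitional)
theorem loopA_succ (m n : Int) (f : Nat) (low high : Int) :
    loopA m n (f + 1) low high =
      (if low < high then
        (if summA (PySem.Int.floordiv (low + high + 1) 2) n m = m then
          PySem.Int.floordiv (low + high + 1) 2
        else if summA (PySem.Int.floordiv (low + high + 1) 2) n m < m then
          loopA m n f (PySem.Int.floordiv (low + high + 1) 2) high
        else loopA m n f low (PySem.Int.floordiv (low + high + 1) 2 - 1))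
      else high) := rfl

theorem bitloopB_zero (n m ans : Int) (bit : Nat) : bitloopB n m 0 ans bit = ans := rfl

theorem bitloopB_succ (n m : Int) (f : Nat) (ans : Int) (bit : Nat) :
    bitloopB n m (f + 1) ans bit =
      (if bit = 0 then ans
      else bitloopB n m f
        (if ans + (bit : Int) ≤ m ∧ needB n (ans + (bit : Int)) ≤ m then ans + (bit : Int) else ans)
        (bit / 2)) := rfl

theorem pvPopF_zero : ∀ f : Nat, pvPopF f 0 = 0 := by
  intro f
  cases f <;> simp [pvPopF]

theorem pvPopF_congr : ∀ (f g t : Nat), t ≤ f → t ≤ g → pvPopF f t = pvPopF g t := by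
  intro f
  induction f with
  | zero =>
    intro g t hf _
    have : t = 0 := by omega
    subst this
    rw [pvPopF_zero, pvPopF_zero]
  | succ f ih =>
    intro g t hf hg
    by_cases h0 : t = 0
    · subst h0
      rw [pvPopF_zero, pvPopF_zero]
    · obtain ⟨g', rfl⟩ : ∃ g', g = g' + 1 := ⟨g - 1, by omega⟩
      have hd : t / 2 < t := Nat.div_lt_self (Nat.pos_of_ne_zero h0) one_lt_two
      simp only [pvPopF, if_neg h0]
      rw [ih g' (t / 2) (by omega) (by omega)]

theorem pvPop_step : ∀ t : Nat, pvPop t = t % 2 + pvPop (t / 2) := by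
  intro t
  by_cases h0 : t = 0
  · subst h0
    simp [pvPop, pvPopF]
  · obtain ⟨f, rfl⟩ : ∃ f, t = f + 1 := ⟨t - 1, by omega⟩
    have hd : (f + 1) / 2 < f + 1 := Nat.div_lt_self (by omega) one_lt_two
    show pvPopF (f + 1) (f + 1) = (f + 1) % 2 + pvPopF ((f + 1) / 2) ((f + 1) / 2)
    simp only [pvPopF, if_neg h0]
    rw [pvPopF_congr f ((f + 1) / 2) ((f + 1) / 2) (by omega) le_rfl]

theorem pvS_closed : ∀ (k t : Nat), pvS t k = pvG t - pvG (t / 2 ^ k) := by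
  intro k
  induction k with
  | zero => intro t; simp [pvS]
  | succ j ih =>
    intro t
    have hdd : t / 2 / 2 ^ j = t / 2 ^ (j + 1) := by
      rw [Nat.div_div_eq_div_mul, pow_succ, mul_comm (2 ^ j) 2]
    simp only [pvS, ih (t / 2), hdd]
    have hG : (t : Int) + pvG (t / 2) = pvG t := by
      simp only [pvG, pvPop_step t]
      have := Nat.mod_add_div t 2
      push_cast
      omega
    omega

theorem needB_eq (n s : Int) (hs : 1 ≤ s) : needB n s = pvSumN s n.toNat := by
  by_cases hn : n ≤ 0
  · have h0 : n.toNat = 0 := by omega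
    simp [needB, hn, h0, pvSumN]
  · have hk : (n.toNat : Int) = n := by omega
    have hu : (if n < ((Nat.size ((s - 1).toNat)) : Int) then ((s - 1).toNat) >>> n.toNat else 0)
        = (s - 1).toNat / 2 ^ n.toNat := by
      by_cases h : n < ((Nat.size ((s - 1).toNat)) : Int)
      · rw [if_pos h]
        exact Nat.shiftRight_eq_div_pow _ _
      · rw [if_neg h]
        have h1 : (s - 1).toNat < 2 ^ Nat.size ((s - 1).toNat) := Nat.lt_size_self _
        have h2 : (2 : Nat) ^ Nat.size ((s - 1).toNat) ≤ 2 ^ n.toNat :=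
          Nat.pow_le_pow_right (by norm_num) (by omega)
        exact (Nat.div_eq_zero_iff.mpr (Or.inr (by omega))).symm
    simp only [needB, if_neg hn]
    rw [hu, pvSumN_shift n.toNat s hs]
    have := pvS_closed n.toNat (s - 1).toNat
    simp only [pvG] at this
    omega

-- the value both searches compute: maximal r in [1, m] that fits, clamped below by 1
def pvRes (k : Nat) (m r : Int) : Prop :=
  1 ≤ r ∧ r ≤ m ∧ (r = 1 ∨ pvSumN r k ≤ m) ∧ ∀ x : Int, r < x → x ≤ m → m < pvSumN x k

theorem pvRes_unique {k : Nat} {m r1 r2 : Int} (h1 : pvRes k m r1) (h2 : pvRes k m r2) :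
    r1 = r2 := by
  obtain ⟨a1, b1, c1, d1⟩ := h1
  obtain ⟨a2, b2, c2, d2⟩ := h2
  rcases lt_trichotomy r1 r2 with h | h | h
  · have := d1 r2 h b2
    rcases c2 with h' | h' <;> omega
  · exact h
  · have := d2 r1 h b1
    rcases c1 with h' | h' <;> omega

theorem loopA_res : ∀ (f : Nat) (n m low high : Int), (high - low).toNat < f →
    2 ≤ m → 1 ≤ low → low ≤ high → high ≤ m →
    (low = 1 ∨ pvSumN low n.toNat ≤ m) →
    (∀ x : Int, high < x → x ≤ m → m < pvSumN x n.toNat) →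
    pvRes n.toNat m (loopA m n f low high) := by
  intro f
  induction f with
  | zero =>
    intro n m low high hd _ _ _ _ _ _
    exact absurd hd (by omega)
  | succ j ih =>
    intro n m low high hd hm hlo hle hhi hfeas hover
    rw [loopA_succ]
    by_cases h : low < high
    · rw [if_pos h]
      have hf : PySem.Int.floordiv (low + high + 1) 2 = (low + high + 1) / 2 :=
        PySem.Int.floordiv_eq_ediv_of_pos (by omega)
      set mid := PySem.Int.floordiv (low + high + 1) 2 with hmid
      have hb : low + 1 ≤ mid ∧ mid ≤ high := by rw [hf]; omega
      rw [summA_eq]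
      by_cases heq : pvSumN mid n.toNat = m
      · rw [if_pos heq]
        have hk : 1 ≤ n.toNat := by
          by_contra hk
          have : n.toNat = 0 := by omega
          rw [this] at heq
          simp [pvSumN] at heq
          omega
        refine ⟨by omega, by omega, Or.inr (by omega), ?_⟩
        intro x hx1 hx2
        have := pvSumN_mono_lt hk hx1
        omega
      · rw [if_neg heq]
        by_cases hlt : pvSumN mid n.toNat < m
        · rw [if_pos hlt]
          exact ih n m mid high (by omega) hm (by omega) (by omega) hhi
            (Or.inr (by omega)) hover
        · rw [if_neg hlt]
          refine ih n m low (mid - 1) (by omega) hm hlo (by omega) (by omega) hfeas ?_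
          intro x hx1 hx2
          have : mid ≤ x := by omega
          have := pvSumN_mono_le n.toNat this
          omega
    · rw [if_neg h]
      have hlh : low = high := by omega
      exact ⟨by omega, hhi, by rw [← hlh]; exact hfeas, hover⟩

theorem bitloopB_inv : ∀ (j : Nat) (n m ans : Int), 0 ≤ ans →
    (ans = 0 ∨ (1 ≤ ans ∧ ans ≤ m ∧ pvSumN ans n.toNat ≤ m)) →
    (∀ y : Int, 1 ≤ y → y ≤ m → pvSumN y n.toNat ≤ m → y < ans + 2 ^ (j + 1)) →
    (bitloopB n m (j + 1) ans (2 ^ j) = 0 ∨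
      (1 ≤ bitloopB n m (j + 1) ans (2 ^ j) ∧ bitloopB n m (j + 1) ans (2 ^ j) ≤ m ∧
        pvSumN (bitloopB n m (j + 1) ans (2 ^ j)) n.toNat ≤ m)) ∧
    (∀ y : Int, 1 ≤ y → y ≤ m → pvSumN y n.toNat ≤ m → y ≤ bitloopB n m (j + 1) ans (2 ^ j)) := by
  intro j
  induction j with
  | zero =>
    intro n m ans hpos hq hbound
    rw [bitloopB_succ]
    simp only [pow_zero]
    rw [if_neg (one_ne_zero), bitloopB_zero]
    push_cast
    by_cases hc : ans + 1 ≤ m ∧ needB n (ans + 1) ≤ m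
    · rw [if_pos hc]
      have hne : needB n (ans + 1) = pvSumN (ans + 1) n.toNat := needB_eq n (ans + 1) (by omega)
      constructor
      · exact Or.inr ⟨by omega, hc.1, by rw [← hne]; exact hc.2⟩
      · intro y hy1 hy2 hy3
        have := hbound y hy1 hy2 hy3
        simp at this
        omega
    · rw [if_neg hc]
      constructor
      · exact hq
      · intro y hy1 hy2 hy3
        have := hbound y hy1 hy2 hy3
        simp at this
        by_contra hgt
        have hy : y = ans + 1 := by omega
        rw [needB_eq n (ans + 1) (by omega), ← hy] at hc
        exact hc ⟨by omega, hy3⟩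
  | succ j ih =>
    intro n m ans hpos hq hbound
    rw [bitloopB_succ]
    have hne : (2 : Nat) ^ (j + 1) ≠ 0 := by positivity
    rw [if_neg hne]
    have hstep : (2 : Nat) ^ (j + 1) / 2 = 2 ^ j := by
      rw [pow_succ]
      exact Nat.mul_div_cancel _ (by norm_num)
    rw [hstep]
    have hcpos : (1 : Int) ≤ ans + ((2 ^ (j + 1) : Nat) : Int) := by
      have : (1 : Nat) ≤ 2 ^ (j + 1) := Nat.one_le_two_pow
      omega
    by_cases hcond : ans + ((2 ^ (j + 1) : Nat) : Int) ≤ m ∧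
        needB n (ans + ((2 ^ (j + 1) : Nat) : Int)) ≤ m
    · rw [if_pos hcond]
      have hne2 : needB n (ans + ((2 ^ (j + 1) : Nat) : Int)) = pvSumN (ans + ((2 ^ (j + 1) : Nat) : Int)) n.toNat :=
        needB_eq n _ hcpos
      refine ih n m _ (by omega) (Or.inr ⟨hcpos, hcond.1, by rw [← hne2]; exact hcond.2⟩) ?_
      intro y hy1 hy2 hy3
      have := hbound y hy1 hy2 hy3
      have hA : (2 : Int) ^ (j + 1) = ((2 ^ (j + 1) : Nat) : Int) := by push_cast; ring
      have hB : (2 : Int) ^ (j + 1 + 1) = 2 * ((2 ^ (j + 1) : Nat) : Int) := by push_cast; ring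
      omega
    · rw [if_neg hcond]
      refine ih n m ans hpos hq ?_
      intro y hy1 hy2 hy3
      by_contra hgt
      have hA : (2 : Int) ^ (j + 1) = ((2 ^ (j + 1) : Nat) : Int) := by push_cast; ring
      have hcy : ans + ((2 ^ (j + 1) : Nat) : Int) ≤ y := by omega
      have hfc : pvSumN (ans + ((2 ^ (j + 1) : Nat) : Int)) n.toNat ≤ pvSumN y n.toNat :=
        pvSumN_mono_le _ hcy
      rw [needB_eq n _ hcpos] at hcond
      exact hcond ⟨by omega, by omega⟩

theorem alt_res (n m : Int) (hn : ¬ n = 1) (hm : 2 ≤ m) (hdom : m ≤ 2147483648) :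
    pvRes n.toNat m (bin_seach_alt n m) := by
  unfold bin_seach_alt
  have hnm : ¬ (n = 1 ∨ m ≤ 1) := fun h => h.elim hn (fun h2 => by omega)
  simp only [hnm, if_neg, not_false_iff]
  set L := Nat.size m.toNat with hL
  have hL1 : 1 ≤ L := by
    rcases Nat.eq_zero_or_pos L with h | h
    · have : m.toNat = 0 := Nat.size_eq_zero.mp h
      omega
    · exact h
  have hLe : L - 1 + 1 = L := by omega
  have hinv := bitloopB_inv (L - 1) n m 0 le_rfl (Or.inl rfl) ?bound
  rw [hLe] at hinv
  case bound =>
    intro y hy1 hy2 _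
    rw [hLe]
    have hms : m.toNat < 2 ^ L := Nat.lt_size_self m.toNat
    have h2 : (m.toNat : Int) < ((2 ^ L : Nat) : Int) := by exact_mod_cast hms
    push_cast at h2
    omega
  set r0 := bitloopB n m L 0 (2 ^ (L - 1)) with hr0
  obtain ⟨hq, hmax⟩ := hinv
  by_cases hz : r0 = 0
  · simp only [hz, if_pos]
    refine ⟨le_refl 1, by omega, Or.inl rfl, ?_⟩
    intro x hx1 hx2
    by_contra hle
    have := hmax x (by omega) hx2 (by omega)
    omega
  · simp only [hz, if_neg, not_false_iff]
    rcases hq with h | ⟨h1, h2, h3⟩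
    · exact absurd h hz
    · refine ⟨h1, h2, Or.inr h3, ?_⟩
      intro x hx1 hx2
      by_contra hle
      have := hmax x (by omega) hx2 (by omega)
      omega

-- ===== VERDICT (by name: the statement is the Claim_ definition above) =====
theorem bin_seach_spec : Claim_equal_bin_seach := by
  intro n m hdom
  unfold Spec_bin_seach
  have hdm : m ≤ 2147483648 := by
    unfold Dom_bin_seach pvDomInt at hdom
    simp only [Bool.and_eq_true, decide_eq_true_eq] at hdom
    exact hdom.2.2
  by_cases h1 : n = 1
  · simp [bin_seach, bin_seach_alt, h1]
  · by_cases hm : 2 ≤ m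
    · have hA : pvRes n.toNat m (bin_seach n m) := by
        unfold bin_seach
        simp only [h1, if_neg, not_false_iff]
        exact loopA_res ((m - 1).toNat + 1) n m 1 m (by omega) hm (by omega) (by omega)
          le_rfl (Or.inl rfl) (by intro x hx1 hx2; omega)
      exact pvRes_unique hA (alt_res n m h1 hm hdm)
    · have hA : bin_seach n m = m := by
        unfold bin_seach
        rw [loopA]
        have : ¬ (1 : Int) < m := by omega
        simp [h1, this]
      have hB : bin_seach_alt n m = m := by
        unfold bin_seach_alt
        have : n = 1 ∨ m ≤ 1 := Or.inr (by omega)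
        simp [this]
      rw [hA, hB]
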